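-- pv_equiv track=rewrite | github.com/tusharkaley/competitive-coding-practice | misc/AK/problem2.py | flip_signs
-- ===== SOURCE A (Python) =====
-- def flip_signs(s, K):
-- 	limit = 0
-- 	flip_count = 0
-- 	for ch in s:
-- 		if ch == '-':
-- 			if limit ==0:
-- 				flip_count = flip_count + 1
-- 			if limit < K:
-- 				limit = limit+ 1
-- 			else:
-- 				return -1
--
-- 		if ch == '+':
-- 			limit = 0
--
-- 	return flip_count
-- ===== SOURCE B (Python) =====
-- def flip_signs(s, K):
--     segs = ''.join(c for c in s if c in '+-').split('+')
--     kk = K if K > 0 else 0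
--     if any(len(seg) > kk for seg in segs):
--         return -1
--     return sum(1 for seg in segs if seg)
-- ===== Notes on version B (the rewrite author's own statement) =====
-- stated objective: simpler
-- what changed: Replaces A's stateful character scan (run-length counter with early return) by filtering the string to '+'/'-' characters, splitting on '+' into maximal '-' runs, then returning -1 if any run exceeds K and otherwise the count of nonempty runs.
import Mathlib
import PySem

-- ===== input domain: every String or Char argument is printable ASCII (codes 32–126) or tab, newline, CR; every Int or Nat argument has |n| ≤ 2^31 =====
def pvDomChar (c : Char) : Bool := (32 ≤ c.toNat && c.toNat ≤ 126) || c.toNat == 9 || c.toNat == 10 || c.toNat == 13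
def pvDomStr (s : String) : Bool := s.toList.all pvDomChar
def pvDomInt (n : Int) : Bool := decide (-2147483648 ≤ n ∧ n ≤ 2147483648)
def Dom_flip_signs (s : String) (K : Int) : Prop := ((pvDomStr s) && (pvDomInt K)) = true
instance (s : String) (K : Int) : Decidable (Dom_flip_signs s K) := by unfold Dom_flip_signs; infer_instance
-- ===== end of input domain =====

-- B replaces A's stateful scan by filter-to-signs / split-on-'+' / validate-and-count segments (objective: simpler decomposition).


-- ===== PORT A =====
-- A's for-loop with early return, as structural recursion over the characters;
-- state (limit, flip_count) exactly as in the Python.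
def flipLoopA : List Char → Int → Int → Int → Int
  | [], _, _, flip_count => flip_count
  | ch :: rest, K, limit, flip_count =>
    if ch == '-' then
      let flip_count := if limit == 0 then flip_count + 1 else flip_count
      if limit < K then flipLoopA rest K (limit + 1) flip_count
      else -1
    else
      flipLoopA rest K (if ch == '+' then 0 else limit) flip_count

def flip_signs (s : String) (K : Int) : Int :=
  flipLoopA s.toList K 0 0

-- ===== PORT B =====
-- str.split('+') on a character list (Python's split: n separators give n+1 pieces).
def splitPlus : List Char → List (List Char)
  | [] => [[]]
  | c :: rest =>
    match splitPlus rest with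
    | [] => [[c]]   -- unreachable: splitPlus never returns []
    | h :: t => if c == '+' then [] :: h :: t else (c :: h) :: t

def flip_signs_alt (s : String) (K : Int) : Int :=
  let segs := splitPlus (s.toList.filter (fun c => c == '+' || c == '-'))
  let kk := if K > 0 then K else 0
  if segs.any (fun seg => (seg.length : Int) > kk) then -1
  else ((segs.filter (fun seg => !seg.isEmpty)).length : Int)

-- ===== PRECONDITION & SPEC =====
def Spec_flip_signs (s : String) (K : Int) (out : Int) : Prop := out = flip_signs_alt s K
instance (s : String) (K : Int) (out : Int) : Decidable (Spec_flip_signs s K out) := by unfold Spec_flip_signs; infer_instance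

-- ===== CLAIM (what is proved, stated in full; the proofs are below) =====
def Claim_equal_flip_signs : Prop := ∀ (s : String) (K : Int), Dom_flip_signs s K → Spec_flip_signs s K (flip_signs s K)

-- ===== LEMMAS AND PROOFS =====

-- Characterisation of A's loop result from the split-into-runs view (proof helper only):
-- the head segment continues the current run of length `limit`; an overflow anywhere gives -1,
-- otherwise fc plus the number of newly started nonempty runs.
def rhsA (K limit fc : Int) : List (List Char) → Int
  | [] => fc
  | h0 :: t =>
    if (h0 ≠ [] ∧ limit + (h0.length : Int) > K)
        ∨ t.any (fun seg => (seg.length : Int) > (if K > 0 then K else 0))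
    then -1
    else fc + (if limit = 0 ∧ h0 ≠ [] then 1 else 0)
           + ((t.filter (fun seg => !seg.isEmpty)).length : Int)

theorem splitPlus_ne_nil (l : List Char) : splitPlus l ≠ [] := by
  cases l with
  | nil => simp [splitPlus]
  | cons c rest =>
    rcases h : splitPlus rest with _ | ⟨hd, tl⟩
    · simp [splitPlus, h]
    · simp only [splitPlus, h]; split <;> simp

theorem flipLoopA_eq (K : Int) (cs : List Char) :
    ∀ (limit fc : Int), (limit = 0 ∨ (0 < limit ∧ limit ≤ K)) →
      flipLoopA cs K limit fc =
        rhsA K limit fc (splitPlus (cs.filter (fun c => c == '+' || c == '-'))) := by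
  induction cs with
  | nil =>
    intro limit fc hl
    simp [flipLoopA, splitPlus, rhsA]
  | cons c rest ih =>
    intro limit fc hl
    rcases hh : splitPlus (rest.filter (fun c => c == '+' || c == '-')) with _ | ⟨h', t'⟩
    · exact absurd hh (splitPlus_ne_nil _)
    by_cases hminus : c = '-'
    · subst hminus
      have hfil : (('-' :: rest).filter (fun c => c == '+' || c == '-'))
          = '-' :: rest.filter (fun c => c == '+' || c == '-') := by simp
      rw [hfil]
      have hsp : splitPlus ('-' :: rest.filter (fun c => c == '+' || c == '-'))
          = ('-' :: h') :: t' := by simp [splitPlus, hh]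
      rw [hsp]
      simp only [flipLoopA, show ('-' == '-') = true from rfl, if_true]
      by_cases hlt : limit < K
      · rw [if_pos hlt, ih (limit + 1) (if limit == 0 then fc + 1 else fc) (Or.inr (by omega)), hh]
        simp only [rhsA]
        have hK : (if K > 0 then K else 0) = K := by
          have : 0 < K := by omega
          simp [this]
        rw [hK]
        have hcond : ((h' ≠ [] ∧ limit + 1 + (h'.length : Int) > K)
            ↔ (('-' :: h') ≠ [] ∧ limit + ((('-' :: h').length : Int)) > K)) := by
          rcases eq_or_ne h' [] with rfl | hne
          · simp; omega
          · have : 0 < h'.length := List.length_pos_iff.mpr hne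
            simp [hne]; omega
        rw [if_congr (or_congr_left hcond) rfl rfl]
        by_cases hb : (('-' :: h') ≠ [] ∧ limit + ((('-' :: h').length : Int)) > K)
            ∨ t'.any (fun seg => (seg.length : Int) > K)
        · rw [if_pos hb, if_pos hb]
        · rw [if_neg hb, if_neg hb]
          have h1 : ¬ (limit + 1 = 0) := by omega
          have h2 : ('-' :: h') ≠ [] := by simp
          rcases hl with rfl | ⟨hpos, _⟩
          · simp [h2]
          · have h3 : ¬ (limit = 0) := by omega
            simp [h1, h2, h3]
      · rw [if_neg hlt]
        simp only [rhsA]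
        have hb : ('-' :: h') ≠ [] ∧ limit + ((('-' :: h').length : Int)) > K := by
          refine ⟨by simp, ?_⟩
          have : (0:Int) ≤ h'.length := Int.natCast_nonneg _
          simp; omega
        rw [if_pos (Or.inl hb)]
    · by_cases hplus : c = '+'
      · subst hplus
        have hfil : (('+' :: rest).filter (fun c => c == '+' || c == '-'))
            = '+' :: rest.filter (fun c => c == '+' || c == '-') := by simp
        rw [hfil]
        have hsp : splitPlus ('+' :: rest.filter (fun c => c == '+' || c == '-'))
            = [] :: h' :: t' := by simp [splitPlus, hh]
        rw [hsp]
        simp only [flipLoopA, show ('+' == '-') = false from rfl,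
          show ('+' == '+') = true from rfl, Bool.false_eq_true, if_false, if_true]
        rw [ih 0 fc (Or.inl rfl), hh]
        simp only [rhsA]
        have hh' : ((h' ≠ [] ∧ (0:Int) + h'.length > K)
            ↔ ((h'.length : Int) > (if K > 0 then K else 0))) := by
          rcases eq_or_ne h' [] with rfl | hne
          · simp; split <;> omega
          · have : 0 < h'.length := List.length_pos_iff.mpr hne
            simp [hne]; split <;> omega
        have hiff : ((h' ≠ [] ∧ (0:Int) + h'.length > K)
              ∨ t'.any (fun seg => (seg.length : Int) > (if K > 0 then K else 0)))
            ↔ ((([] : List Char) ≠ [] ∧ limit + (([] : List Char).length : Int) > K)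
              ∨ (h' :: t').any (fun seg => (seg.length : Int) > (if K > 0 then K else 0))) := by
          simp only [List.any_cons]
          constructor
          · rintro (h | h)
            · exact Or.inr (by simp [hh'.mp h])
            · exact Or.inr (by simp [h])
          · rintro (h | h)
            · exact absurd rfl h.1
            · rcases (by simpa using h) with h | h
              · exact Or.inl (hh'.mpr h)
              · exact Or.inr (by simpa using h)
        by_cases hb : (([] : List Char) ≠ [] ∧ limit + (([] : List Char).length : Int) > K)
            ∨ (h' :: t').any (fun seg => (seg.length : Int) > (if K > 0 then K else 0))
        · rw [if_pos (hiff.mpr hb), if_pos hb]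
        · rw [if_neg (fun h => hb (hiff.mp h)), if_neg hb]
          simp only [List.filter_cons]
          rcases eq_or_ne h' [] with rfl | hne
          · simp
          · have hE : (!(h'.isEmpty)) = true := by simp [hne]
            simp [hne, hE]
            ring
      · have hf : (c == '+' || c == '-') = false := by
          simp [hminus, hplus]
        have hfil : ((c :: rest).filter (fun c => c == '+' || c == '-'))
            = rest.filter (fun c => c == '+' || c == '-') := by
          simp [hf]
        rw [hfil]
        simp only [flipLoopA]
        have h1 : (c == '-') = false := by simp [hminus]
        have h2 : (c == '+') = false := by simp [hplus]
        simp only [h1, h2, Bool.false_eq_true, if_false]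
        exact ih limit fc hl

-- ===== VERDICT (by name: the statement is the Claim_ definition above) =====
theorem flip_signs_spec : Claim_equal_flip_signs := by
  intro s K _
  unfold Spec_flip_signs flip_signs flip_signs_alt
  rw [flipLoopA_eq K s.toList 0 0 (Or.inl rfl)]
  rcases hh : splitPlus (s.toList.filter (fun c => c == '+' || c == '-')) with _ | ⟨h0, t⟩
  · exact absurd hh (splitPlus_ne_nil _)
  simp only [rhsA]
  have hh0 : ((h0 ≠ [] ∧ (0:Int) + h0.length > K)
      ↔ ((h0.length : Int) > (if K > 0 then K else 0))) := by
    rcases eq_or_ne h0 [] with rfl | hne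
    · simp; split <;> omega
    · have : 0 < h0.length := List.length_pos_iff.mpr hne
      simp [hne]; split <;> omega
  have hcond : ((h0 ≠ [] ∧ (0:Int) + h0.length > K)
        ∨ t.any (fun seg => (seg.length : Int) > (if K > 0 then K else 0)))
      ↔ ((h0 :: t).any (fun seg => (seg.length : Int) > (if K > 0 then K else 0)) = true) := by
    simp only [List.any_cons]
    constructor
    · rintro (h | h)
      · simp [hh0.mp h]
      · simp [h]
    · intro h
      rcases (by simpa using h) with h | h
      · exact Or.inl (hh0.mpr h)
      · exact Or.inr (by simpa using h)
  rw [if_congr hcond rfl rfl]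
  by_cases hb : ((h0 :: t).any (fun seg => (seg.length : Int) > (if K > 0 then K else 0)) = true)
  · rw [if_pos hb, if_pos hb]
  · rw [if_neg hb, if_neg hb]
    simp only [List.filter_cons]
    rcases eq_or_ne h0 [] with rfl | hne
    · simp
    · have hE : (!(h0.isEmpty)) = true := by simp [hne]
      simp [hne, hE]
      ring
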